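-- pv_equiv track=rewrite | github.com/Westbroobo/Project_YT | Lian-tuoh/2.Liantuoh_detail.py | list_cleand
-- ===== SOURCE A (Python) =====
-- def list_cleand(lst):
--     new_list = []
--     lst.sort()
--     for x, y in zip(lst, lst[1:]):
--         if y - x > 1:
--             new_list.append(lst[:lst.index(y)])
--             lst = lst[lst.index(y):]
--     new_list.append(lst)
--     return new_list
-- ===== SOURCE B (Python) =====
-- def list_cleand(lst):
--     lst.sort()
--     groups = []
--     cur = []
--     for v in lst:
--         if cur and v - cur[-1] <= 1:
--             cur.append(v)
--         else:
--             if cur: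
--                 groups.append(cur)
--             cur = [v]
--     if cur:
--         groups.append(cur)
--     return groups
-- ===== Notes on version B (the rewrite author's own statement) =====
-- stated objective: alternative
-- what changed: Single forward pass over the sorted list that extends or starts the current run by comparing each element with the previous one, instead of rescanning with list.index and re-slicing the remaining list at every gap.
-- intended difference: On the empty list A returns [[]] (it unconditionally appends the leftover empty list), while B returns [], the intended 'no runs' answer for no input. — e.g. on list_cleand([]): A returns [[]], B returns []
import Mathlib
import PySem

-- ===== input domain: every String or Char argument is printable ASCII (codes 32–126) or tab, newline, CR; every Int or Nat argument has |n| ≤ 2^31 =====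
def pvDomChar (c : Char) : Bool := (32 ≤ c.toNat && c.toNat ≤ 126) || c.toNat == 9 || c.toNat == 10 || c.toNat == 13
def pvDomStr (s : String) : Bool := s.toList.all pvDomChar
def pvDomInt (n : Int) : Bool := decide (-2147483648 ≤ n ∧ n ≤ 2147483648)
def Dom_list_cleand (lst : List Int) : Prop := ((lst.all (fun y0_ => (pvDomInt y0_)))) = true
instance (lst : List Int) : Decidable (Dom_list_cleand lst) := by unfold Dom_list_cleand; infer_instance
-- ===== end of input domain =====

-- B replaces A's per-gap list.index rescans and re-slicing with one forward pass over the
-- sorted list that compares each element with its predecessor (objective: alternative).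
-- Both A and B sort the argument list in place; the theorems are about the return value only.

-- ===== PORT A =====
-- one loop iteration of A: state = (new_list, lst); pair (x, y) from the zip
def astepA (st : List (List Int) × List Int) (xy : Int × Int) : List (List Int) × List Int :=
  if xy.2 - xy.1 > 1 then
    match PySem.List.index? st.2 xy.2 with
    | some i =>
        (st.1 ++ [PySem.List.slice st.2 none (some (i : Int))],
         PySem.List.slice st.2 (some (i : Int)) none)
    | none => st   -- unreachable: y is drawn from the sorted list, so lst.index(y) never raises
  else st

def list_cleand (lst : List Int) : List (List Int) :=
  let l := PySem.List.sorted lst (fun x => x) false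
  let st := (List.zip l (PySem.List.slice l (some 1) none)).foldl astepA ([], l)
  st.1 ++ [st.2]

-- ===== PORT B =====
-- one loop iteration of B: state = (groups, cur)
def bstepB (st : List (List Int) × List Int) (v : Int) : List (List Int) × List Int :=
  match st.2.getLast? with
  | some last => if v - last ≤ 1 then (st.1, st.2 ++ [v]) else (st.1 ++ [st.2], [v])
  | none => (st.1, [v])

def list_cleand_alt (lst : List Int) : List (List Int) :=
  let st := (PySem.List.sorted lst (fun x => x) false).foldl bstepB ([], [])
  if st.2 = [] then st.1 else st.1 ++ [st.2]

-- ===== PRECONDITION & SPEC =====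
-- On the empty list A returns [[]] (it unconditionally appends the leftover empty list),
-- while B returns [], the intended "no runs" answer for no input.
def D_list_cleand (lst : List Int) : Prop := lst = []
instance (lst : List Int) : Decidable (D_list_cleand lst) := by unfold D_list_cleand; infer_instance

def Spec_list_cleand (lst : List Int) (out : List (List Int)) : Prop :=
  ¬ D_list_cleand lst → out = list_cleand_alt lst
instance (lst : List Int) (out : List (List Int)) : Decidable (Spec_list_cleand lst out) := by
  unfold Spec_list_cleand; infer_instance

def pvDiffWitness_list_cleand : List Int := []
def pvDiffWitnessOut_list_cleand : (List (List Int)) × (List (List Int)) := ([[]], [])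

-- ===== CLAIM (what is proved, stated in full; the proofs are below) =====
def Claim_unchanged_list_cleand : Prop :=
  ∀ (lst : List Int), Dom_list_cleand lst → Spec_list_cleand lst (list_cleand lst)
def Claim_changed_list_cleand : Prop :=
  Dom_list_cleand (pvDiffWitness_list_cleand) ∧ D_list_cleand (pvDiffWitness_list_cleand) ∧
  list_cleand (pvDiffWitness_list_cleand) = pvDiffWitnessOut_list_cleand.1 ∧
  list_cleand_alt (pvDiffWitness_list_cleand) = pvDiffWitnessOut_list_cleand.2 ∧
  pvDiffWitnessOut_list_cleand.1 ≠ pvDiffWitnessOut_list_cleand.2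
def Claim_exact_list_cleand : Prop :=
  ∀ (lst : List Int), Dom_list_cleand lst → D_list_cleand lst →
    list_cleand lst ≠ list_cleand_alt lst

-- ===== LEMMAS AND PROOFS =====

-- common reference point: split the tail `l` into maximal runs, `g` being the
-- run accumulated so far whose last element is `prev`
def chopGo (prev : Int) (g : List Int) : List Int → List (List Int)
  | [] => [g]
  | y :: l => if y - prev > 1 then g :: chopGo y [y] l else chopGo y (g ++ [y]) l

theorem bfold_eq_chopGo (l : List Int) :
    ∀ (groups : List (List Int)) (cur : List Int) (prev : Int),
      cur.getLast? = some prev →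
      (l.foldl bstepB (groups, cur)).2 ≠ [] ∧
      (l.foldl bstepB (groups, cur)).1 ++ [(l.foldl bstepB (groups, cur)).2] =
        groups ++ chopGo prev cur l := by
  induction l with
  | nil =>
      intro groups cur prev h
      refine ⟨?_, rfl⟩
      intro hc
      simp only [List.foldl_nil] at hc
      subst hc
      simp at h
  | cons y l ih =>
      intro groups cur prev h
      simp only [List.foldl_cons, bstepB, h, chopGo]
      by_cases hle : y - prev ≤ 1
      · have hng : ¬ (y - prev > 1) := by omega
        simp only [if_pos hle, if_neg hng]
        have := ih groups (cur ++ [y]) y (by simp)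
        simpa using this
      · have hg : y - prev > 1 := by omega
        simp only [if_neg hle, if_pos hg]
        have := ih (groups ++ [cur]) [y] y (by simp)
        simpa using this

theorem index_run (r : List Int) (x y : Int) (l : List Int)
    (hr : ∀ a ∈ r, a ≤ x) (hxy : y - x > 1) :
    PySem.List.index? (r ++ x :: y :: l) y = some (r.length + 1) := by
  rw [PySem.List.index?_eq_some_iff]
  refine ⟨r ++ [x], l, by simp, by simp, ?_⟩
  intro hmem
  rcases List.mem_append.1 hmem with h | h
  · have := hr y h; omega
  · simp at h; omega

theorem afold_eq_chopGo (l : List Int) :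
    ∀ (x : Int) (r : List Int) (acc : List (List Int)),
      (∀ a ∈ r, a ≤ x) → List.IsChain (· ≤ ·) (x :: l) →
      ((List.zip (x :: l) l).foldl astepA (acc, r ++ x :: l)).1 ++
        [((List.zip (x :: l) l).foldl astepA (acc, r ++ x :: l)).2] =
        acc ++ chopGo x (r ++ [x]) l := by
  induction l with
  | nil => intro x r acc _ _; simp [chopGo]
  | cons y l ih =>
      intro x r acc hr hchain
      rw [List.isChain_cons_cons] at hchain
      have hxy : x ≤ y := hchain.1
      have hchain' : List.IsChain (· ≤ ·) (y :: l) := hchain.2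
      simp only [List.zip_cons_cons, List.foldl_cons, astepA, chopGo]
      by_cases hg : y - x > 1
      · have hidx := index_run r x y l hr hg
        simp only [if_pos hg, hidx]
        have h1 : PySem.List.slice (r ++ x :: y :: l) none (some ((r.length + 1 : Nat) : Int)) =
            r ++ [x] := by
          rw [PySem.List.slice_to_natCast]
          have : r ++ x :: y :: l = (r ++ [x]) ++ y :: l := by simp
          rw [this, List.take_left' (by simp)]
        have h2 : PySem.List.slice (r ++ x :: y :: l) (some ((r.length + 1 : Nat) : Int)) none =
            y :: l := by
          rw [PySem.List.slice_from_natCast]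
          have : r ++ x :: y :: l = (r ++ [x]) ++ y :: l := by simp
          rw [this, List.drop_left' (by simp)]
        rw [h1, h2]
        have := ih y [] (acc ++ [r ++ [x]]) (by simp) hchain'
        simpa using this
      · simp only [if_neg hg]
        have hre : r ++ x :: y :: l = (r ++ [x]) ++ y :: l := by simp
        rw [hre]
        have hr' : ∀ a ∈ r ++ [x], a ≤ y := by
          intro a ha
          rcases List.mem_append.1 ha with h | h
          · exact le_trans (hr a h) hxy
          · simp at h; omega
        have := ih y (r ++ [x]) acc hr' hchain'
        simpa [chopGo] using this

theorem both_eq (lst : List Int) (h : lst ≠ []) :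
    list_cleand lst = list_cleand_alt lst := by
  have hs : PySem.List.sorted lst (fun x => x) false ≠ [] := by
    rw [Ne, PySem.List.sorted_eq_nil_iff]; exact h
  obtain ⟨a, l, hl⟩ := List.exists_cons_of_ne_nil hs
  have hpw : (PySem.List.sorted lst (fun x => x) false).Pairwise (· ≤ ·) :=
    PySem.List.sorted_pairwise lst (fun x => x)
  rw [hl] at hpw
  have hchain : List.IsChain (· ≤ ·) (a :: l) := hpw.isChain
  unfold list_cleand list_cleand_alt
  rw [hl]
  have hA := afold_eq_chopGo l a [] [] (by simp) hchain
  have hB := bfold_eq_chopGo l [] [a] a (by simp)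
  simp only [PySem.List.slice_from_one, List.tail_cons]
  simp only [List.nil_append] at hA
  have hBstep : (a :: l).foldl bstepB ([], []) = l.foldl bstepB ([], [a]) := by
    simp [bstepB]
  simp only [hBstep, if_neg hB.1, hA, hB.2, List.nil_append]

-- ===== VERDICT (by name: the statement is the Claim_ definition above) =====
theorem list_cleand_spec : Claim_unchanged_list_cleand := by
  intro lst _ hD
  exact both_eq lst hD

theorem list_cleand_changed : Claim_changed_list_cleand := by
  unfold Claim_changed_list_cleand; decide

theorem list_cleand_tight : Claim_exact_list_cleand := by
  intro lst _ hD
  rw [hD]; decide
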